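-- pv_equiv track=rewrite | github.com/AstromechZA/tableprinter | tableprinter/data_extractor.py | get_column_widths
-- ===== SOURCE A (Python) =====
-- def get_column_widths(data2d):
--     """Determine the required column widths for the two dimentional data provided.
--
--     Content width is based of the repr() function of each data element.
--     """
--     column_widths = []
--     for row in data2d:
--         # ensure the data structure has enough columns
--         if len(column_widths) < len(row):
--             column_widths = column_widths + [0] * (len(row) - len(column_widths))
--         # loop through all the items in the row
--         for i, cell in enumerate(row):
--             # determine length of cell content
--             l = len(repr(cell))
--             # increase column width if required
--             if l > column_widths[i]:
--                 column_widths[i] = l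
--     return column_widths
-- ===== SOURCE B (Python) =====
-- def get_column_widths(data2d):
--     """Determine the required column widths for the two dimentional data provided.
--
--     Content width is based of the repr() function of each data element.
--     """
--     num_cols = max((len(row) for row in data2d), default=0)
--     return [max((len(repr(row[i])) for row in data2d if i < len(row)), default=0)
--             for i in range(num_cols)]
-- ===== Notes on version B (the rewrite author's own statement) =====
-- stated objective: alternative
-- what changed: Column-major reduction: compute the column count first, then take one max-of-repr-lengths per column over the rows, instead of A's row-major loop that pads and mutates a running-maxima list per cell.
import Mathlib
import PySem

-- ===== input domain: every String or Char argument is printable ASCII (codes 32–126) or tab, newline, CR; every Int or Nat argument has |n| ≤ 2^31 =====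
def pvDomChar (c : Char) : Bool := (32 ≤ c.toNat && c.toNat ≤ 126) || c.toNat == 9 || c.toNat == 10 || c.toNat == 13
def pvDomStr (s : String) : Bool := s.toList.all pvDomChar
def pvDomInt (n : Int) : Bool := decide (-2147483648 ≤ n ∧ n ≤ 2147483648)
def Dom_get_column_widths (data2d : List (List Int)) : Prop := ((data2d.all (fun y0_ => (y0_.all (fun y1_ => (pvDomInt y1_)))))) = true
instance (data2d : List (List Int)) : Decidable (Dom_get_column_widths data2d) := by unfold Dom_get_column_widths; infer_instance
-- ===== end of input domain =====

-- B computes the same widths column-major (column count first, then one max per column)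
-- instead of A's row-major running-maxima loop; objective: alternative decomposition, same cost.

-- ===== PORT A =====
-- len(repr(cell)) for an int cell (repr(int) = str(int))
def pvReprLen (n : Int) : Int := ((PySem.Int.toChars n).length : Int)

-- the body of A's outer loop: pad with zeros, then the enumerate loop raising running maxima
def pvStep (column_widths : List Int) (row : List Int) : List Int :=
  let cw := if column_widths.length < row.length
            then column_widths ++ List.replicate (row.length - column_widths.length) (0 : Int)
            else column_widths
  (PySem.List.enumerate row).foldl
    (fun cw p =>
      let l := pvReprLen p.2
      if l > PySem.List.pyGetD cw p.1 0 then cw.set p.1.toNat l else cw) cw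

def get_column_widths (data2d : List (List Int)) : List Int :=
  data2d.foldl pvStep []

-- ===== PORT B =====
def get_column_widths_alt (data2d : List (List Int)) : List Int :=
  let numCols : Int := PySem.List.maxD (data2d.map (fun row => ((row.length : Int)))) (fun x => x) 0
  (PySem.List.pyRange 0 numCols 1).map (fun i =>
    PySem.List.maxD
      (((data2d.filter (fun row => decide (i < (row.length : Int)))).map
        (fun row => pvReprLen (row.getD i.toNat 0)))) (fun x => x) 0)

-- ===== PRECONDITION & SPEC =====
def Spec_get_column_widths (data2d : List (List Int)) (out : List Int) : Prop := out = get_column_widths_alt data2d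
instance (data2d : List (List Int)) (out : List Int) : Decidable (Spec_get_column_widths data2d out) := by unfold Spec_get_column_widths; infer_instance

-- ===== CLAIM (what is proved, stated in full; the proofs are below) =====
def Claim_equal_get_column_widths : Prop := ∀ (data2d : List (List Int)), Dom_get_column_widths data2d → Spec_get_column_widths data2d (get_column_widths data2d)

-- ===== LEMMAS AND PROOFS =====

-- spec-side column count: maximal row length seen so far
def pvMaxLen (d : List (List Int)) : Nat := d.foldl (fun a r => max a r.length) 0

-- spec-side width of column i: row-major running max over the rows that reach column i
def pvW (d : List (List Int)) (i : Nat) : Int :=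
  d.foldl (fun a r => if i < r.length then max a (pvReprLen (r.getD i 0)) else a) 0

-- A's inner enumerate loop preserves the list length
theorem pvInner_length (r : List Int) (cw : List Int) (s : Int) :
    ((PySem.List.enumerate r s).foldl
      (fun cw p =>
        let l := pvReprLen p.2
        if l > PySem.List.pyGetD cw p.1 0 then cw.set p.1.toNat l else cw) cw).length = cw.length := by
  induction r generalizing cw s with
  | nil => simp [PySem.List.enumerate]
  | cons x xs ih =>
    rw [PySem.List.enumerate_cons, List.foldl_cons]
    rw [ih]
    simp only []
    split <;> simp

-- padding with zeros does not change any getD-with-default-0 entry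
theorem pvPad_getD (cw : List Int) (k i : Nat) :
    (cw ++ List.replicate k (0:Int)).getD i 0 = cw.getD i 0 := by
  simp only [List.getD_eq_getElem?_getD, List.getElem?_append, List.getElem?_replicate]
  split
  · rfl
  · rename_i h
    rw [List.getElem?_eq_none (by omega)]
    split <;> simp

-- A's inner enumerate loop, entrywise: each touched entry becomes the max with the repr length
theorem pvInner_getD (r : List Int) (cw : List Int) (s : Nat)
    (hlen : s + r.length ≤ cw.length) (i : Nat) :
    ((PySem.List.enumerate r (s : Int)).foldl
      (fun cw p =>
        let l := pvReprLen p.2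
        if l > PySem.List.pyGetD cw p.1 0 then cw.set p.1.toNat l else cw) cw).getD i 0
    = if s ≤ i ∧ i < s + r.length then max (cw.getD i 0) (pvReprLen (r.getD (i - s) 0))
      else cw.getD i 0 := by
  induction r generalizing cw s with
  | nil =>
    simp [PySem.List.enumerate]
    try omega
  | cons x xs ih =>
    rw [PySem.List.enumerate_cons, List.foldl_cons]
    have hs : s < cw.length := by simp at hlen; omega
    have hget : PySem.List.pyGetD cw ((s:Int)) 0 = cw.getD s 0 := by
      rw [PySem.List.pyGetD_of_nonneg _ _ (by positivity)]; simp
    have hcast : ((s:Int)) + 1 = (((s+1 : Nat)):Int) := by push_cast; ring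
    simp only [hcast]
    set cw' := (let l := pvReprLen (((s:Int)), x).2;
        if l > PySem.List.pyGetD cw (((s:Int)), x).1 0 then cw.set (((s:Int)), x).1.toNat l else cw) with hcw'
    have hcw'getD : ∀ j : Nat, cw'.getD j 0
        = if j = s then max (cw.getD s 0) (pvReprLen x) else cw.getD j 0 := by
      intro j
      simp only [hcw', hget]
      split
      · rename_i hgt
        simp only [Int.toNat_natCast]
        by_cases hj : j = s
        · subst hj
          rw [if_pos rfl]
          have hset : (cw.set j (pvReprLen x)).getD j 0 = pvReprLen x := by
            rw [List.getD_eq_getElem _ _ (by simpa using hs)]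
            simp
          rw [hset]
          omega
        · rw [List.getD_eq_getElem?_getD, List.getElem?_set_ne (by omega), if_neg hj,
              List.getD_eq_getElem?_getD]
      · rename_i hle
        by_cases hj : j = s
        · subst hj; rw [if_pos rfl]; omega
        · rw [if_neg hj]
    have hlen' : cw'.length = cw.length := by
      simp only [hcw']; split <;> simp
    rw [ih cw' (s+1) (by simp at hlen ⊢; omega)]
    by_cases h1 : i = s
    · subst h1
      rw [if_neg (by omega), if_pos ⟨le_refl _, by simp⟩, hcw'getD, if_pos rfl]
      simp
    · by_cases h2 : s ≤ i ∧ i < s + (x :: xs).length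
      · have h3 : s + 1 ≤ i ∧ i < (s+1) + xs.length := by simp at h2 ⊢; omega
        rw [if_pos h3, if_pos h2, hcw'getD, if_neg h1]
        have : i - s = (i - (s+1)) + 1 := by omega
        rw [this]
        simp
      · have h3 : ¬ (s + 1 ≤ i ∧ i < (s+1) + xs.length) := by simp at h2 ⊢; omega
        rw [if_neg h3, if_neg h2, hcw'getD, if_neg h1]

theorem pvStep_length (cw : List Int) (r : List Int) :
    (pvStep cw r).length = max cw.length r.length := by
  unfold pvStep
  rw [pvInner_length]
  split <;> rename_i h <;> simp <;> omega

theorem pvStep_getD (cw : List Int) (r : List Int) (i : Nat) :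
    (pvStep cw r).getD i 0
      = if i < r.length then max (cw.getD i 0) (pvReprLen (r.getD i 0)) else cw.getD i 0 := by
  unfold pvStep
  set cw0 := if cw.length < r.length then cw ++ List.replicate (r.length - cw.length) (0:Int) else cw with hcw0
  have hlen0 : r.length ≤ cw0.length := by rw [hcw0]; split <;> [simp; skip] <;> omega
  have hkey := pvInner_getD r cw0 0 (by simpa using hlen0) i
  simp only [Nat.cast_zero] at hkey
  rw [hkey]
  have hpad : cw0.getD i 0 = cw.getD i 0 := by
    rw [hcw0]; split
    · rw [pvPad_getD]
    · rfl
  simp only [hpad, Nat.zero_add, Nat.sub_zero, Nat.zero_le, true_and]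

theorem pvA_length (d : List (List Int)) : (get_column_widths d).length = pvMaxLen d := by
  induction d using List.reverseRecOn with
  | nil => simp [get_column_widths, pvMaxLen]
  | append_singleton d r ih =>
    simp only [get_column_widths, pvMaxLen, List.foldl_append, List.foldl_cons, List.foldl_nil]
    rw [pvStep_length]
    simp only [get_column_widths, pvMaxLen] at ih
    rw [ih]

theorem pvA_getD (d : List (List Int)) (i : Nat) : (get_column_widths d).getD i 0 = pvW d i := by
  induction d using List.reverseRecOn with
  | nil => simp [get_column_widths, pvW]
  | append_singleton d r ih =>
    simp only [get_column_widths, pvW, List.foldl_append, List.foldl_cons, List.foldl_nil]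
    rw [pvStep_getD]
    simp only [get_column_widths, pvW] at ih
    rw [ih]

-- max(xs, default=0) is the running-max fold when all elements are nonnegative
theorem pvMaxD_id (xs : List Int) (h : ∀ x ∈ xs, 0 ≤ x) :
    PySem.List.maxD xs (fun x => x) 0 = xs.foldl max 0 := by
  cases xs with
  | nil => simp [PySem.List.maxD, PySem.List.max?]
  | cons x t =>
    rw [PySem.List.maxD, PySem.List.max?_id_cons]
    simp only [Option.getD_some, List.foldl_cons]
    have : max (0:Int) x = x := max_eq_right (h x (by simp))
    rw [this]

-- a max over a filtered projection is the guarded running-max fold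
theorem pvFoldl_filter_map {α : Type} (p : α → Bool) (f : α → Int) (d : List α) (a : Int) :
    ((d.filter p).map f).foldl max a = d.foldl (fun a r => if p r then max a (f r) else a) a := by
  induction d generalizing a with
  | nil => rfl
  | cons x t ih =>
    by_cases h : p x
    · simp [h, ih]
    · simp [h, ih]

theorem pvMaxLen_cast (d : List (List Int)) :
    ((pvMaxLen d : Nat) : Int) = (d.map (fun r => ((r.length : Int)))).foldl max 0 := by
  suffices h : ∀ (a : Nat), ((d.foldl (fun a r => max a r.length) a : Nat) : Int)
      = (d.map (fun r => ((r.length : Int)))).foldl max ((a : Nat) : Int) by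
    simpa using h 0
  induction d with
  | nil => simp
  | cons r t ih => intro a; simp [ih]

-- B's value, rewritten to the spec-side form
theorem pvB_eq (d : List (List Int)) :
    get_column_widths_alt d = (List.range (pvMaxLen d)).map (fun i => pvW d i) := by
  unfold get_column_widths_alt
  have h1 : PySem.List.maxD (d.map (fun row => ((row.length : Int)))) (fun x => x) 0
      = ((pvMaxLen d : Nat) : Int) := by
    rw [pvMaxD_id _ (by simp), pvMaxLen_cast]
  simp only [h1]
  rw [PySem.List.pyRange_zero_natCast, List.map_map]
  apply List.map_congr_left
  intro k hk
  simp only [Function.comp]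
  rw [pvMaxD_id _ (by intro x hx; simp [pvReprLen] at hx; obtain ⟨r, -, hr⟩ := hx; rw [← hr]; simp)]
  rw [pvFoldl_filter_map]
  simp only [Int.toNat_natCast, pvW]
  congr 1
  funext a r
  simp

-- ===== VERDICT (by name: the statement is the Claim_ definition above) =====
theorem get_column_widths_spec : Claim_equal_get_column_widths := by
  intro d _
  unfold Spec_get_column_widths
  rw [pvB_eq]
  apply List.ext_getElem
  · simp [pvA_length]
  · intro i h1 h2
    have hi : i < pvMaxLen d := by simpa [pvA_length] using h1
    have hA := pvA_getD d i
    rw [List.getD_eq_getElem?_getD, List.getElem?_eq_getElem h1] at hA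
    simp only [Option.getD_some] at hA
    rw [List.getElem_map, List.getElem_range, hA]
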